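-- pv_equiv track=rewrite | github.com/maxmmueller/WaveWhisper | source/combine_audio.py | overlay_wavs
-- ===== SOURCE A (Python) =====
-- def overlay_wavs(samples1, samples2):
--     combined_samples = []
--     length1, length2 = len(samples1), len(samples2)
--     max_length = max(length1, length2)
--
--     for i in range(max_length):
--         sample1 = samples1[i] if i < length1 else 0
--         sample2 = samples2[i] if i < length2 else 0
--         combined_samples.append(int((sample1 + sample2) / 2))
--
--     return combined_samples
-- ===== SOURCE B (Python) =====
-- def overlay_wavs(samples1, samples2):
--     combined_samples = [int((a + b) / 2) for a, b in zip(samples1, samples2)]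
--     n = len(combined_samples)
--     tail = samples1[n:] if len(samples1) >= len(samples2) else samples2[n:]
--     combined_samples.extend(int(x / 2) for x in tail)
--     return combined_samples
-- ===== Notes on version B (the rewrite author's own statement) =====
-- stated objective: simpler
-- what changed: Replaces A's index loop over range(max(len1,len2)) with per-index bound tests by a zip over the common prefix plus a halved tail slice of the longer list.
import Mathlib
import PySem

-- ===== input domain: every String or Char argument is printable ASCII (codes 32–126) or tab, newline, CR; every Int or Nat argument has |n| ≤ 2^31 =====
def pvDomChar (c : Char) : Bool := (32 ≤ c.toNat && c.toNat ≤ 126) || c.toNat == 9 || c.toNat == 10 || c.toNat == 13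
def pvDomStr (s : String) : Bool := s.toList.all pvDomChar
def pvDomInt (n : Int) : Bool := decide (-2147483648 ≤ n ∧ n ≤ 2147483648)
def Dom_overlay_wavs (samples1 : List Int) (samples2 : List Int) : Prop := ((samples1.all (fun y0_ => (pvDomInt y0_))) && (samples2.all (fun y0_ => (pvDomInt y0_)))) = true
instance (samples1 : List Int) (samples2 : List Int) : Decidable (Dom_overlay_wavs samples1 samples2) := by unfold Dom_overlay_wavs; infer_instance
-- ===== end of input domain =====

-- B replaces A's single index loop over range(max(len1,len2)) with zip over the common
-- prefix plus a halved tail of the longer list (objective: simpler, no per-index bound tests).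
-- int((x)/2): on the stated domain |x| ≤ 2^32, float division by 2 is exact, and int()
-- truncates toward zero, i.e. Int.tdiv x 2 — exact here.

-- ===== PORT A =====
def overlay_wavs (samples1 : List Int) (samples2 : List Int) : List Int :=
  let length1 : Int := samples1.length
  let length2 : Int := samples2.length
  let maxLength : Int := max length1 length2
  (PySem.List.pyRange 0 maxLength 1).foldl (fun acc i =>
    let sample1 : Int := if i < length1 then PySem.List.pyGetD samples1 i 0 else 0
    let sample2 : Int := if i < length2 then PySem.List.pyGetD samples2 i 0 else 0
    acc ++ [(sample1 + sample2).tdiv 2]) []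

-- ===== PORT B =====
def overlay_wavs_alt (samples1 : List Int) (samples2 : List Int) : List Int :=
  let combined := List.zipWith (fun a b => (a + b).tdiv 2) samples1 samples2
  let n := combined.length
  -- samples1[n:] with 0 ≤ n is exactly List.drop n
  let tail := if samples2.length ≤ samples1.length then samples1.drop n else samples2.drop n
  combined ++ tail.map (fun x => x.tdiv 2)

-- ===== PRECONDITION & SPEC =====
def Spec_overlay_wavs (samples1 : List Int) (samples2 : List Int) (out : List Int) : Prop := out = overlay_wavs_alt samples1 samples2
instance (samples1 : List Int) (samples2 : List Int) (out : List Int) : Decidable (Spec_overlay_wavs samples1 samples2 out) := by unfold Spec_overlay_wavs; infer_instance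

-- ===== CLAIM (what is proved, stated in full; the proofs are below) =====
def Claim_equal_overlay_wavs : Prop := ∀ (samples1 : List Int) (samples2 : List Int), Dom_overlay_wavs samples1 samples2 → Spec_overlay_wavs samples1 samples2 (overlay_wavs samples1 samples2)

-- ===== LEMMAS AND PROOFS =====

-- the per-index value A computes, stated over Nat indices (getD 0 absorbs both bound tests)
def pvHalfSum (s1 s2 : List Int) (k : Nat) : Int := (s1.getD k 0 + s2.getD k 0).tdiv 2

theorem pvHalfSum_succ (a b : Int) (as bs : List Int) (k : Nat) :
    pvHalfSum (a :: as) (b :: bs) (k + 1) = pvHalfSum as bs k := by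
  simp [pvHalfSum]

theorem pv_range_map_nil_left (l : List Int) :
    (List.range l.length).map (pvHalfSum [] l) = l.map (fun x => x.tdiv 2) := by
  induction l with
  | nil => simp
  | cons b bs ih =>
      simp only [List.length_cons, List.range_succ_eq_map, List.map_cons, List.map_map]
      refine congrArg₂ _ (by simp [pvHalfSum]) ?_
      rw [← ih]
      exact List.map_congr_left (fun k _ => by simp [pvHalfSum, Function.comp])

theorem pv_range_map_nil_right (l : List Int) :
    (List.range l.length).map (pvHalfSum l []) = l.map (fun x => x.tdiv 2) := by
  induction l with
  | nil => simp
  | cons b bs ih =>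
      simp only [List.length_cons, List.range_succ_eq_map, List.map_cons, List.map_map]
      refine congrArg₂ _ (by simp [pvHalfSum]) ?_
      rw [← ih]
      exact List.map_congr_left (fun k _ => by simp [pvHalfSum, Function.comp])

-- A's loop, rewritten as a map of pvHalfSum over a Nat range
theorem pv_A_eq_range_map (s1 s2 : List Int) :
    overlay_wavs s1 s2 = (List.range (max s1.length s2.length)).map (pvHalfSum s1 s2) := by
  unfold overlay_wavs
  rw [PySem.List.foldl_append_singleton_eq_map, PySem.List.pyRange_one]
  simp only [List.nil_append, List.map_map]
  have hmax : ((max (s1.length : Int) (s2.length : Int)) - 0).toNat = max s1.length s2.length := by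
    omega
  rw [hmax]
  refine List.map_congr_left (fun k hk => ?_)
  simp only [Function.comp, zero_add, pvHalfSum]
  have h1 : (if (k : Int) < (s1.length : Int) then PySem.List.pyGetD s1 (k : Int) 0 else 0)
      = s1.getD k 0 := by
    by_cases h : k < s1.length
    · simp [PySem.List.pyGetD_natCast, h]
    · have : s1.getD k 0 = 0 := List.getD_eq_default _ _ (by omega)
      simp [h]
  have h2 : (if (k : Int) < (s2.length : Int) then PySem.List.pyGetD s2 (k : Int) 0 else 0)
      = s2.getD k 0 := by
    by_cases h : k < s2.length
    · simp [PySem.List.pyGetD_natCast, h]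
    · have : s2.getD k 0 = 0 := List.getD_eq_default _ _ (by omega)
      simp [h]
  rw [h1, h2]

-- the range-map form equals B
theorem pv_range_map_eq_alt (s1 s2 : List Int) :
    (List.range (max s1.length s2.length)).map (pvHalfSum s1 s2) = overlay_wavs_alt s1 s2 := by
  induction s1 generalizing s2 with
  | nil =>
      cases s2 with
      | nil => simp [overlay_wavs_alt]
      | cons b bs =>
          rw [overlay_wavs_alt]
          simp only [List.zipWith_nil_left, List.length_nil, List.length_cons,
            Nat.max_eq_right (Nat.zero_le _)]
          rw [if_neg (by omega)]
          simpa using pv_range_map_nil_left (b :: bs)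
  | cons a as ih =>
      cases s2 with
      | nil =>
          rw [overlay_wavs_alt]
          simp only [List.zipWith_nil_right, List.length_nil, List.length_cons,
            Nat.max_eq_left (Nat.zero_le _)]
          rw [if_pos (by omega)]
          simpa using pv_range_map_nil_right (a :: as)
      | cons b bs =>
          have hmax : max (a :: as).length (b :: bs).length = max as.length bs.length + 1 := by
            simp [Nat.succ_max_succ]
          rw [hmax, List.range_succ_eq_map, List.map_cons, List.map_map]
          have htail : (List.range (max as.length bs.length)).map (pvHalfSum (a :: as) (b :: bs) ∘ Nat.succ)
              = (List.range (max as.length bs.length)).map (pvHalfSum as bs) :=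
            List.map_congr_left (fun k _ => pvHalfSum_succ a b as bs k)
          rw [htail, ih bs]
          rw [overlay_wavs_alt, overlay_wavs_alt]
          simp only [List.zipWith_cons_cons, List.length_cons, List.length_zipWith, pvHalfSum,
            List.getD_cons_zero, List.drop_succ_cons, Nat.add_le_add_iff_right]
          by_cases h : bs.length ≤ as.length <;> simp [h]

-- ===== VERDICT (by name: the statement is the Claim_ definition above) =====
theorem overlay_wavs_spec : Claim_equal_overlay_wavs := by
  intro s1 s2 _
  unfold Spec_overlay_wavs
  rw [pv_A_eq_range_map, pv_range_map_eq_alt]
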